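-- pv_equiv track=rewrite | github.com/humancipher/Programming_Contest | Programming_Contest/AtCoder/ABC/ABC_100-199/ABC_160-169/ABC_167/ABC_167_C.py | study
-- ===== SOURCE A (Python) =====
-- def study(A,C,m,n,b,x):
--     B = [0 for _ in range(m)]
--     cost = 0
--     for i in range(n):
--         if b[i] == "1":
--             for j in range(m):
--                 B[j] += A[i][j]
--             cost += C[i]
--     if min(B) >= x:
--         return (True,cost)
--     else:
--         return (False,-1)
-- ===== SOURCE B (Python) =====
-- def study(A, C, m, n, b, x):
--     # Check columns one at a time with early exit on the first deficient skill;
--     # no B array, no min(); cost is computed in a separate pass only on success.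
--     j = 0
--     while j < m:
--         s = 0
--         for i in range(n):
--             if b[i] == "1":
--                 s += A[i][j]
--         if not (s >= x):
--             return (False, -1)
--         j += 1
--     cost = 0
--     for i in range(n):
--         if b[i] == "1":
--             cost += C[i]
--     return (True, cost)
-- ===== Notes on version B (the rewrite author's own statement) =====
-- stated objective: alternative
-- what changed: Replaces A's accumulate-all-columns-then-min strategy with a column-by-column check that short-circuits on the first deficient skill (no B array, no min()) and computes the cost in a separate pass only on success.
import Mathlib
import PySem

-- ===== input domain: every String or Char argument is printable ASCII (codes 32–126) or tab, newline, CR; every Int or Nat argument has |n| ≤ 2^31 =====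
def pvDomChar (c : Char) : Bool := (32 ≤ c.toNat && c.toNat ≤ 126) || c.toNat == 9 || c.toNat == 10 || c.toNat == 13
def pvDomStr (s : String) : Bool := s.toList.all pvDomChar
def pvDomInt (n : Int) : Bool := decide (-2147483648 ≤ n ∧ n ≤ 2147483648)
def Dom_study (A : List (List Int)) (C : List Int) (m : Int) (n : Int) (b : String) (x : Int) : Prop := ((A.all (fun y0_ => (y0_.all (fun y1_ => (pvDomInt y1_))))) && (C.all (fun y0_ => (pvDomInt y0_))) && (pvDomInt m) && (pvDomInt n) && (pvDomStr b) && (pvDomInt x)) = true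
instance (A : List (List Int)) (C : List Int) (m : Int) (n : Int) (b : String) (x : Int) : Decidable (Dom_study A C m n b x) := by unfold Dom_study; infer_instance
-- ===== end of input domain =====

-- B replaces A's accumulate-all-columns-then-min strategy with a column-by-column
-- check that short-circuits on the first deficient skill (no B array, no min()) and computes
-- the cost in a separate pass only on success (objective: alternative decomposition).

-- ===== PORT A =====
-- inner loop: for j in range(m): B[j] += A[i][j]
def studyStep (Ai : List Int) (m : Nat) (B : List Int) : List Int :=
  (List.range m).foldl (fun B j => B.set j (B.getD j 0 + Ai.getD j 0)) B

def study (A : List (List Int)) (C : List Int) (m : Int) (n : Int) (b : String) (x : Int) : Bool × Int :=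
  let B0 : List Int := (List.range m.toNat).map (fun _ => 0)
  let st := (List.range n.toNat).foldl
    (fun (st : List Int × Int) i =>
      if (b.toList.getD i ' ' == '1') then
        (studyStep (A.getD i []) m.toNat st.1, st.2 + C.getD i 0)
      else st) (B0, 0)
  match PySem.List.min? st.1 (fun v => v) with
  | some mn => if mn ≥ x then (true, st.2) else (false, -1)
  | none => (false, -1)

-- ===== PORT B =====
-- s = 0; for i in range(n): if b[i] == "1": s += A[i][j]
def colSum (A : List (List Int)) (n : Int) (b : String) (j : Nat) : Int :=
  (List.range n.toNat).foldl
    (fun s i => if (b.toList.getD i ' ' == '1') then s + (A.getD i []).getD j 0 else s) 0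

-- def ok(j): if j == m: return True; …; return s >= x and ok(j+1)
-- (recursion on the number of remaining columns rem = m - j)
def okFrom (A : List (List Int)) (n : Int) (b : String) (x : Int) : Nat → Nat → Bool
  | _, 0 => true
  | j, rem+1 => if x ≤ colSum A n b j then okFrom A n b x (j+1) rem else false

def study_alt (A : List (List Int)) (C : List Int) (m : Int) (n : Int) (b : String) (x : Int) : Bool × Int :=
  if okFrom A n b x 0 m.toNat then
    (true, (List.range n.toNat).foldl
      (fun c i => if (b.toList.getD i ' ' == '1') then c + C.getD i 0 else c) 0)
  else (false, -1)

-- ===== PRECONDITION & SPEC =====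
-- Pre_: exactly where Python A returns: m ≥ 1 (min of an empty list raises), b long
-- enough for all i < n, and each selected row i has A[i], C[i] and at least m skills.
def Pre_study (A : List (List Int)) (C : List Int) (m : Int) (n : Int) (b : String) (x : Int) : Prop :=
  1 ≤ m ∧ n ≤ (b.toList.length : Int) ∧ ∀ i ∈ List.range n.toNat,
    b.toList.getD i ' ' = '1' → i < A.length ∧ i < C.length ∧ m.toNat ≤ (A.getD i []).length
instance (A : List (List Int)) (C : List Int) (m : Int) (n : Int) (b : String) (x : Int) : Decidable (Pre_study A C m n b x) := by unfold Pre_study; infer_instance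

def pvWitness_study : List (List Int) × List Int × Int × Int × String × Int := ([[1]], [2], 1, 1, "1", 0)

def Spec_study (A : List (List Int)) (C : List Int) (m : Int) (n : Int) (b : String) (x : Int) (out : Bool × Int) : Prop := out = study_alt A C m n b x
instance (A : List (List Int)) (C : List Int) (m : Int) (n : Int) (b : String) (x : Int) (out : Bool × Int) : Decidable (Spec_study A C m n b x out) := by unfold Spec_study; infer_instance

-- ===== CLAIM (what is proved, stated in full; the proofs are below) =====
def Claim_equal_study : Prop := ∀ (A : List (List Int)) (C : List Int) (m : Int) (n : Int) (b : String) (x : Int), Dom_study A C m n b x → Pre_study A C m n b x → Spec_study A C m n b x (study A C m n b x)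

-- ===== LEMMAS AND PROOFS =====

-- A's guarded loop on a product state = two separate folds over the filtered indices.
theorem foldl_pair_filter {α β γ : Type} (p : γ → Bool) (f : α → γ → α) (g : β → γ → β) :
    ∀ (l : List γ) (a : α) (b : β),
      l.foldl (fun st i => if p i then (f st.1 i, g st.2 i) else st) (a, b)
        = ((l.filter p).foldl f a, (l.filter p).foldl g b) := by
  intro l
  induction l with
  | nil => intro a b; simp
  | cons h t ih =>
    intro a b
    by_cases hp : p h = true <;> simp [hp, ih]

-- a guarded single fold = a fold over the filtered list
theorem foldl_guard_filter {α γ : Type} (p : γ → Bool) (g : α → γ → α) :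
    ∀ (l : List γ) (a : α),
      l.foldl (fun c i => if p i then g c i else c) a = (l.filter p).foldl g a := by
  intro l
  induction l with
  | nil => intro a; simp
  | cons h t ih =>
    intro a
    by_cases hp : p h = true <;> simp [hp, ih]

theorem foldl_add_map {γ : Type} (f : γ → Int) :
    ∀ (l : List γ) (c : Int), l.foldl (fun c i => c + f i) c = c + (l.map f).sum := by
  intro l
  induction l with
  | nil => simp
  | cons h t ih => intro c; simp [ih, add_assoc]

-- one pass of A's inner loop, characterised pointwise
theorem studyStep_fold (Ai : List Int) (B : List Int) :
    ∀ (k : Nat), k ≤ B.length →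
      (List.range k).foldl (fun B j => B.set j (B.getD j 0 + Ai.getD j 0)) B
        = B.mapIdx (fun j v => if j < k then v + Ai.getD j 0 else v) := by
  intro k
  induction k with
  | zero =>
    intro _
    apply List.ext_getElem <;> simp
  | succ k ih =>
    intro hk
    rw [List.range_succ, List.foldl_append, ih (by omega)]
    simp only [List.foldl_cons, List.foldl_nil]
    apply List.ext_getElem
    · simp
    · intro j hj hj'
      have hjB : j < B.length := by simpa using hj
      have hgd : (B.mapIdx (fun j v => if j < k then v + Ai.getD j 0 else v)).getD k 0
          = B.getD k 0 := by
        rw [List.getD_eq_getElem _ _ (by simpa using hk),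
            List.getD_eq_getElem _ _ (by omega)]
        simp
      rw [List.getElem_set, List.getElem_mapIdx]
      by_cases hjk : k = j
      · subst hjk
        rw [if_pos rfl, hgd, List.getElem_mapIdx, if_pos (by omega : k < k + 1),
            List.getD_eq_getElem _ _ (by omega : k < B.length)]
      · rw [if_neg hjk, List.getElem_mapIdx]
        by_cases h1 : j < k
        · rw [if_pos h1, if_pos (by omega : j < k + 1)]
        · rw [if_neg h1, if_neg (by omega : ¬ j < k + 1)]

theorem studyStep_len (Ai : List Int) (m : Nat) (B : List Int) :
    (studyStep Ai m B).length = B.length := by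
  unfold studyStep
  induction (List.range m) generalizing B with
  | nil => rfl
  | cons h t ih => simp only [List.foldl_cons]; rw [ih]; simp

theorem studyStep_eq (Ai : List Int) (mN : Nat) (B : List Int) (hB : B.length = mN) :
    studyStep Ai mN B = B.mapIdx (fun j v => if j < mN then v + Ai.getD j 0 else v) := by
  unfold studyStep
  exact studyStep_fold Ai B mN (by omega)

-- the outer fold over a selection list, column by column
theorem sel_fold (A : List (List Int)) (mN : Nat) :
    ∀ (sel : List Nat) (B : List Int), B.length = mN →
      sel.foldl (fun B i => studyStep (A.getD i []) mN B) B
        = (List.range mN).map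
            (fun j => B.getD j 0 + (sel.map (fun i => (A.getD i []).getD j 0)).sum) := by
  intro sel
  induction sel with
  | nil =>
    intro B hB
    apply List.ext_getElem
    · simp [hB]
    · intro j hj hj'
      simp only [List.foldl_nil] at hj ⊢
      rw [List.getElem_map, List.getElem_range]
      rw [List.getD_eq_getElem _ _ (by omega : j < B.length)]
      simp
  | cons s rest ih =>
    intro B hB
    simp only [List.foldl_cons]
    rw [ih (studyStep (A.getD s []) mN B) (by rw [studyStep_len]; exact hB)]
    apply List.map_congr_left
    intro j hj
    have hjm : j < mN := List.mem_range.mp hj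
    rw [studyStep_eq _ _ _ hB]
    have : (B.mapIdx (fun j v => if j < mN then v + (A.getD s []).getD j 0 else v)).getD j 0
        = B.getD j 0 + (A.getD s []).getD j 0 := by
      rw [List.getD_eq_getElem _ _ (by simpa [hB] using hjm),
          List.getD_eq_getElem _ _ (by omega : j < B.length)]
      simp [hjm]
    rw [this]
    simp [add_assoc]

theorem getD_map_zero (l : List Nat) (j : Nat) : (l.map (fun _ => (0:Int))).getD j 0 = 0 := by
  simp only [List.getD, List.getElem?_map]
  cases l[j]? <;> simp

-- B's column sum equals the selection-list sum A's vector carries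
theorem colSum_eq (A : List (List Int)) (n : Int) (b : String) (j : Nat) :
    colSum A n b j
      = (((List.range n.toNat).filter (fun i => b.toList.getD i ' ' == '1')).map
          (fun i => (A.getD i []).getD j 0)).sum := by
  unfold colSum
  rw [foldl_guard_filter, foldl_add_map]
  simp

-- B's recursive early-exit check = "every remaining column meets the threshold"
theorem okFrom_iff (A : List (List Int)) (n : Int) (b : String) (x : Int) :
    ∀ (rem j : Nat), okFrom A n b x j rem = true ↔ ∀ k < rem, x ≤ colSum A n b (j + k) := by
  intro rem
  induction rem with
  | zero => intro j; simp [okFrom]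
  | succ rem ih =>
    intro j
    unfold okFrom
    by_cases h : x ≤ colSum A n b j
    · rw [if_pos h, ih (j+1)]
      constructor
      · intro hall k hk
        rcases Nat.eq_zero_or_pos k with h0 | hpos
        · simpa [h0] using h
        · have := hall (k - 1) (by omega)
          have hke : j + 1 + (k - 1) = j + k := by omega
          rwa [hke] at this
      · intro hall k hk
        have := hall (k + 1) (by omega)
        have hke : j + (k + 1) = j + 1 + k := by omega
        rwa [hke] at this
    · rw [if_neg h]
      constructor
      · intro hf; exact absurd hf (by simp)
      · intro hall; exact absurd (by simpa using hall 0 (by omega)) h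

theorem study_eq_alt (A : List (List Int)) (C : List Int) (m : Int) (n : Int) (b : String)
    (x : Int) (hm : 1 ≤ m) :
    study A C m n b x = study_alt A C m n b x := by
  unfold study study_alt
  have hmN : 1 ≤ m.toNat := by omega
  have hpair := foldl_pair_filter (fun i => b.toList.getD i ' ' == '1')
      (fun B i => studyStep (A.getD i []) m.toNat B) (fun c i => c + C.getD i 0)
      (List.range n.toNat) ((List.range m.toNat).map (fun _ => (0:Int))) 0
  rw [sel_fold A m.toNat _ _ (by simp)] at hpair
  simp only [hpair, getD_map_zero, zero_add]
  -- the vector A builds is exactly the list of B's column sums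
  have hvec : ((List.range m.toNat).map
      (fun j => (((List.range n.toNat).filter (fun i => b.toList.getD i ' ' == '1')).map
        (fun i => (A.getD i []).getD j 0)).sum))
      = (List.range m.toNat).map (fun j => colSum A n b j) := by
    apply List.map_congr_left
    intro j _
    rw [colSum_eq]
  rw [hvec, foldl_guard_filter]
  -- min? is some since the list is nonempty
  have hne : (List.range m.toNat).map (fun j => colSum A n b j) ≠ [] := by
    simp [List.map_eq_nil_iff, List.range_eq_nil]
    omega
  cases hmin : PySem.List.min? ((List.range m.toNat).map (fun j => colSum A n b j))
      (fun v => v) with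
  | none =>
    exact absurd (Iff.mp (PySem.List.min?_eq_none_iff _ _) hmin) hne
  | some mn =>
    have hmem := PySem.List.min?_mem hmin
    have hisMin := PySem.List.min?_isMin hmin
    by_cases hok : okFrom A n b x 0 m.toNat = true
    · have hall := (okFrom_iff A n b x m.toNat 0).mp hok
      have hge : x ≤ mn := by
        rcases List.mem_map.mp hmem with ⟨j, hj, hje⟩
        have := hall j (List.mem_range.mp hj)
        simpa [hje] using this
      simp [ge_iff_le, hge, hok]
    · have hok' : okFrom A n b x 0 m.toNat = false := by
        cases h : okFrom A n b x 0 m.toNat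
        · rfl
        · exact absurd h hok
      have hlt : ¬ x ≤ mn := by
        intro hx
        apply hok
        rw [okFrom_iff]
        intro k hk
        have hmemk : colSum A n b k ∈ (List.range m.toNat).map (fun j => colSum A n b j) :=
          List.mem_map.mpr ⟨k, List.mem_range.mpr hk, rfl⟩
        have := hisMin _ hmemk
        simp only [Nat.zero_add]
        omega
      simp [ge_iff_le, hlt, hok']

-- ===== VERDICT (by name: the statement is the Claim_ definition above) =====
theorem study_spec : Claim_equal_study := by
  intro A C m n b x _ hpre
  unfold Spec_study
  exact study_eq_alt A C m n b x hpre.1
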